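-- pv_equiv track=rewrite | github.com/Mariamawatt/TP_Ateliers_Prog | AP4/exercie3.py | outputStr
-- ===== SOURCE A (Python) =====
-- def outputStr(mot: str, lpos:list)-> str:
--     chr_fin = ""
--
--     #for num_indice in range (len(lpos)):
--     for i in range (len(mot)):
--         if i in lpos :
--             chr_fin += mot [i]
--         else :
--             chr_fin += "_"
--
--     return chr_fin
-- ===== SOURCE B (Python) =====
-- def outputStr(mot: str, lpos: list) -> str:
--     res = ['_'] * len(mot)
--     for p in lpos:
--         if 0 <= p < len(mot):
--             res[p] = mot[p]
--     return ''.join(res)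
-- ===== Notes on version B (the rewrite author's own statement) =====
-- stated objective: faster
-- what changed: B pre-fills an underscore buffer and scatters the kept characters by position from lpos, instead of scanning every index of mot with an 'i in lpos' membership test.
import Mathlib
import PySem

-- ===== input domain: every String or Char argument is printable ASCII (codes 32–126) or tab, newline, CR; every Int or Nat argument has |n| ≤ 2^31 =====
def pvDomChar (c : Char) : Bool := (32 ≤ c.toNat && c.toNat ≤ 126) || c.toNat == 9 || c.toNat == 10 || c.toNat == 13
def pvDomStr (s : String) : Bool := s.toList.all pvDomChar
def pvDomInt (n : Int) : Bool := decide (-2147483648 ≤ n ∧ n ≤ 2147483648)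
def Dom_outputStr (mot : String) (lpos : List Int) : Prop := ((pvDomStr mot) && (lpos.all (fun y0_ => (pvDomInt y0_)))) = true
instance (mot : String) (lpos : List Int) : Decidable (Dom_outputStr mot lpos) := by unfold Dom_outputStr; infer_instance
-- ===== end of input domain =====

-- B scatters the kept characters into a pre-filled '_' buffer (one pass over lpos)
-- instead of A's scan of every index of mot with an 'i in lpos' membership test.

-- ===== PORT A =====
-- chr_fin = ""; for i in range(len(mot)): chr_fin += mot[i] if i in lpos else "_"
def outputStr (mot : String) (lpos : List Int) : String :=
  let cs := mot.toList
  String.ofList ((PySem.List.pyRange 0 cs.length 1).foldl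
    (fun acc i =>
      if lpos.contains i then acc ++ [PySem.List.pyGetD cs i '_']
      else acc ++ ['_']) [])

-- ===== PORT B =====
-- res = ['_'] * len(mot); for p in lpos: if 0 <= p < len(mot): res[p] = mot[p]; return ''.join(res)
def outputStr_alt (mot : String) (lpos : List Int) : String :=
  let cs := mot.toList
  String.ofList (lpos.foldl
    (fun r p =>
      if 0 ≤ p ∧ p < (cs.length : Int) then PySem.List.pySetD r p (PySem.List.pyGetD cs p '_')
      else r)
    (List.replicate cs.length '_'))

-- ===== PRECONDITION & SPEC =====
def Spec_outputStr (mot : String) (lpos : List Int) (out : String) : Prop := out = outputStr_alt mot lpos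
instance (mot : String) (lpos : List Int) (out : String) : Decidable (Spec_outputStr mot lpos out) := by unfold Spec_outputStr; infer_instance

-- ===== CLAIM (what is proved, stated in full; the proofs are below) =====
def Claim_equal_outputStr : Prop := ∀ (mot : String) (lpos : List Int), Dom_outputStr mot lpos → Spec_outputStr mot lpos (outputStr mot lpos)

-- ===== LEMMAS AND PROOFS =====

-- B's fold preserves the buffer length
theorem scatter_length (cs : List Char) (l : List Int) (r : List Char) :
    (l.foldl (fun r p =>
      if 0 ≤ p ∧ p < (cs.length : Int) then PySem.List.pySetD r p (PySem.List.pyGetD cs p '_')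
      else r) r).length = r.length := by
  induction l generalizing r with
  | nil => rfl
  | cons p rest ih =>
      simp only [List.foldl_cons]
      rw [ih]
      split_ifs with h
      · rw [PySem.List.pySetD_of_nonneg _ _ h.1, List.length_set]
      · rfl

-- one step of B's fold, looked at through position i
theorem scatter_step_get (cs : List Char) (r : List Char) (p : Int) (i : Nat)
    (hi : i < cs.length) (hr : r.length = cs.length) :
    ((if 0 ≤ p ∧ p < (cs.length : Int) then PySem.List.pySetD r p (PySem.List.pyGetD cs p '_')
      else r))[i]? = if (i : Int) = p then cs[i]? else r[i]? := by
  by_cases he : (i : Int) = p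
  · subst he
    have h : 0 ≤ (i : Int) ∧ (i : Int) < (cs.length : Int) := ⟨by omega, by omega⟩
    rw [if_pos h, if_pos rfl, PySem.List.pySetD_of_nonneg _ _ h.1]
    have ht : (i : Int).toNat = i := by omega
    rw [ht, PySem.List.pyGetD_natCast, List.getElem?_set_self (by omega),
        List.getD_eq_getElem _ _ hi, List.getElem?_eq_getElem hi]
  · rw [if_neg he]
    split_ifs with h
    · rw [PySem.List.pySetD_of_nonneg _ _ h.1, List.getElem?_set_ne (by omega)]
    · rfl

-- B's fold, characterised elementwise
theorem scatter_get (cs : List Char) (l : List Int) (r : List Char) (i : Nat)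
    (hi : i < cs.length) (hr : r.length = cs.length) :
    (l.foldl (fun r p =>
      if 0 ≤ p ∧ p < (cs.length : Int) then PySem.List.pySetD r p (PySem.List.pyGetD cs p '_')
      else r) r)[i]? = if (i : Int) ∈ l then cs[i]? else r[i]? := by
  induction l generalizing r with
  | nil => simp
  | cons p rest ih =>
      simp only [List.foldl_cons]
      have hlen : ((if 0 ≤ p ∧ p < (cs.length : Int) then PySem.List.pySetD r p (PySem.List.pyGetD cs p '_')
          else r)).length = cs.length := by
        split_ifs with h
        · rw [PySem.List.pySetD_of_nonneg _ _ h.1, List.length_set, hr]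
        · exact hr
      rw [ih _ hlen, scatter_step_get cs r p i hi hr]
      by_cases hm : (i : Int) ∈ rest
      · simp [hm, List.mem_cons]
      · by_cases hp : (i : Int) = p <;> simp [hm, hp, List.mem_cons]

-- A's append-fold builds the mapped range
theorem gather_eq_map (g : Int → Char) (l : List Int) (acc : List Char) (lpos : List Int) :
    (l.foldl (fun acc i =>
      if lpos.contains i then acc ++ [g i] else acc ++ ['_']) acc)
      = acc ++ l.map (fun i => if lpos.contains i then g i else '_') := by
  induction l generalizing acc with
  | nil => simp
  | cons x xs ih =>
      simp only [List.foldl_cons, List.map_cons]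
      split_ifs with h <;> rw [ih] <;> simp

-- ===== VERDICT (by name: the statement is the Claim_ definition above) =====
theorem outputStr_spec : Claim_equal_outputStr := by
  intro mot lpos _
  unfold Spec_outputStr outputStr outputStr_alt
  apply congrArg String.ofList
  rw [gather_eq_map, PySem.List.pyRange_one, List.nil_append, List.map_map]
  have hn : (((mot.toList.length : Int) - 0).toNat) = mot.toList.length := by omega
  rw [hn]
  apply List.ext_getElem?
  intro i
  rw [List.getElem?_map]
  by_cases hi : i < mot.toList.length
  · rw [List.getElem?_range hi, scatter_get _ lpos _ i hi (by simp)]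
    by_cases hm : (i : Int) ∈ lpos
    · simp [Function.comp, hm, List.getElem?_eq_getElem hi]
    · have hi' : i < mot.length := by simpa using hi
      simp [Function.comp, hm, hi']
  · rw [List.getElem?_eq_none (by simpa using hi),
        List.getElem?_eq_none (by rw [scatter_length]; simpa using hi)]
    simp
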